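-- pv_equiv track=rewrite | github.com/reuven/course-setup | src/setup_course_github/setup_course.py | _resolve_group
-- ===== SOURCE A (Python) =====
-- def _resolve_group(
--     group_name: str,
--     all_groups: dict[str, list[str]],
--     _expanding: set[str] | None = None,
-- ) -> tuple[list[str], set[str]]:
--     """Resolve a group into (flat_packages, referenced_group_names).
--
--     Each entry in a group's list is checked: if it's a key in *all_groups*,
--     it is recursively expanded.  Otherwise it is treated as a literal package
--     name.  Raises ``ValueError`` on circular references.
--     """
--     if _expanding is None:
--         _expanding = set()
--
--     if group_name in _expanding:
--         raise ValueError(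
--             f"Circular extras-group reference: "
--             f"{' -> '.join(_expanding)} -> {group_name}"
--         )
--
--     _expanding = _expanding | {group_name}
--     expanded_groups: set[str] = {group_name}
--
--     seen: set[str] = set()
--     flat: list[str] = []
--
--     for entry in all_groups.get(group_name, []):
--         if entry in all_groups:
--             # It's a group reference – recurse
--             sub_pkgs, sub_groups = _resolve_group(entry, all_groups, _expanding)
--             expanded_groups |= sub_groups
--             for pkg in sub_pkgs:
--                 if pkg not in seen:
--                     seen.add(pkg)
--                     flat.append(pkg)
--         else:
--             # Literal package name
--             if entry not in seen:
--                 seen.add(entry)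
--                 flat.append(entry)
--
--     return flat, expanded_groups
-- ===== SOURCE B (Python) =====
-- def _resolve_group(
--     group_name: str,
--     all_groups: dict[str, list[str]],
--     _expanding: set[str] | None = None,
-- ) -> tuple[list[str], set[str]]:
--     """Resolve a group into (flat_packages, referenced_group_names).
--
--     Iterative depth-first traversal with an explicit stack of
--     (group, entries, index) frames, a single global first-visit group set
--     and one global on-the-fly package dedup.  Raises ``ValueError`` on
--     circular references.
--     """
--     path = set(_expanding) if _expanding is not None else set()
--     if group_name in path:
--         raise ValueError(f"Circular extras-group reference: -> {group_name}")
--     path.add(group_name)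
--     groups = {group_name}
--     seen: set[str] = set()
--     flat: list[str] = []
--     stack = [(group_name, all_groups.get(group_name, []), 0)]
--     while stack:
--         name, entries, i = stack.pop()
--         if i == len(entries):
--             path.discard(name)
--             continue
--         stack.append((name, entries, i + 1))
--         entry = entries[i]
--         if entry in all_groups:
--             if entry in path:
--                 raise ValueError(f"Circular extras-group reference: -> {entry}")
--             path.add(entry)
--             groups.add(entry)
--             stack.append((entry, all_groups.get(entry, []), 0))
--         elif entry not in seen:
--             seen.add(entry)
--             flat.append(entry)
--     return flat, groups
-- ===== Notes on version B (the rewrite author's own statement) =====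
-- stated objective: alternative
-- what changed: A is a top-down recursion that threads a per-call seen/flat dedup pair and merges per-call group sets on return; B replaces the recursion by an iterative explicit stack of (group, entries, index) frames with one global first-visit group set and one global on-the-fly package dedup, so no per-level state or set unions exist.
import Mathlib
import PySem

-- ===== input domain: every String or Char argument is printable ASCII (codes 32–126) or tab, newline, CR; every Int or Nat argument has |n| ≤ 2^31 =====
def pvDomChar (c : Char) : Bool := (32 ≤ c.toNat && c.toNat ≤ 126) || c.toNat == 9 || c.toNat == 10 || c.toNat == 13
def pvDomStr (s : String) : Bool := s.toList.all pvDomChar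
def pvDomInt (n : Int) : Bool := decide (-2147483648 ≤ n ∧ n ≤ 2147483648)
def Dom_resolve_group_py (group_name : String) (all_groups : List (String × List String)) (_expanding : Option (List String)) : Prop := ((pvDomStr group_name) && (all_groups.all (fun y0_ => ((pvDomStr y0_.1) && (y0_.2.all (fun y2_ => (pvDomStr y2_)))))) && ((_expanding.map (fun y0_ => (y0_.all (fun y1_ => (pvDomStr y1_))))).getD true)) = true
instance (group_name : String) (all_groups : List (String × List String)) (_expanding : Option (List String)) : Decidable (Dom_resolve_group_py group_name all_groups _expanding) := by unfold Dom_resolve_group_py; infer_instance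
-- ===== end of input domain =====

-- B replaces A's top-down recursion (per-call seen/flat dedup, per-call group-set unions on
-- return) by an iterative explicit-stack DFS with one global first-visit group set and one
-- global on-the-fly package dedup; same value on Pre_.

-- ===== PORT A =====
-- `_expanding if _expanding is not None else set()` (shared by both ports' headers)
def pvExp0 : Option (List String) → PySem.Set String
  | none => PySem.Set.empty
  | some l => PySem.Set.ofList l

-- `if pkg not in seen: seen.add(pkg); flat.append(pkg)` — A's dedup step
def pvDedupStep (st : PySem.Set String × List String) (pkg : String) :
    PySem.Set String × List String :=
  if PySem.Set.contains st.1 pkg then st else (PySem.Set.add st.1 pkg, st.2 ++ [pkg])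

-- A's `for entry in all_groups.get(group_name, [])` loop; `rec` is A's recursive call
-- with `all_groups` and the extended `_expanding` applied.  State: (expanded_groups, seen, flat).
def pvLoopA (G : PySem.Dict String (List String))
    (rec : String → Option (List String × PySem.Set String)) :
    List String → PySem.Set String × PySem.Set String × List String →
      Option (PySem.Set String × PySem.Set String × List String)
  | [], st => some st
  | entry :: rest, st =>
    if PySem.Dict.contains G entry then
      match rec entry with
      | none => none
      | some (subPkgs, subGroups) =>
        pvLoopA G rec rest (PySem.Set.union st.1 subGroups,
          subPkgs.foldl pvDedupStep (st.2.1, st.2.2))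
    else
      pvLoopA G rec rest (st.1, pvDedupStep (st.2.1, st.2.2) entry)

-- A's recursion; `none` = the ValueError on circular references.  The fuel only makes
-- the recursion total in Lean; it never runs out on inputs where A returns.
def pvResolveA (G : PySem.Dict String (List String)) :
    Nat → String → PySem.Set String → Option (List String × PySem.Set String)
  | 0, _, _ => none
  | fuel + 1, g, exp =>
    if PySem.Set.contains exp g then none
    else
      match pvLoopA G (fun e => pvResolveA G fuel e (PySem.Set.add exp g))
          (PySem.Dict.getD G g []) (PySem.Set.ofList [g], PySem.Set.empty, []) with
      | none => none
      | some (eg, _, flat) => some (flat, eg)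

def resolve_group_py (group_name : String) (all_groups : List (String × List String))
    (_expanding : Option (List String)) : List String × List String :=
  match pvResolveA (PySem.Dict.mk all_groups) (all_groups.length + 1) group_name
      (pvExp0 _expanding) with
  | some r => r
  | none => ([], [])   -- unreachable under Pre_ (there A raises ValueError)

-- ===== PORT B =====
-- fuel for B's `while stack:` loop: a totality guard only; it never runs out on
-- inputs where B returns (proved below)
def pvFuel (gs : List (String × List String)) : Nat :=
  ((gs.map (fun p => p.2.length)).sum + 2) ^ (gs.length + 2) + 1

-- B's while loop over the explicit stack of (name, entries, i) frames.
-- State: stack, path, groups (first-visit set), seen, flat; `none` = the ValueError.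
def pvMach (G : PySem.Dict String (List String)) :
    Nat → List (String × List String × Nat) → PySem.Set String → PySem.Set String →
      PySem.Set String → List String → Option (List String × List String)
  | 0, _, _, _, _, _ => none
  | _ + 1, [], _, groups, _, flat => some (flat, groups)
  | f + 1, (nm, entries, i) :: stk, path, groups, seen, flat =>
    if i = entries.length then
      pvMach G f stk (PySem.Set.discard path nm) groups seen flat
    else if PySem.Dict.contains G (entries.getD i "") then
      if PySem.Set.contains path (entries.getD i "") then none
      else
        pvMach G f ((entries.getD i "", PySem.Dict.getD G (entries.getD i "") [], 0)
            :: (nm, entries, i + 1) :: stk)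
          (PySem.Set.add path (entries.getD i ""))
          (PySem.Set.add groups (entries.getD i "")) seen flat
    else if PySem.Set.contains seen (entries.getD i "") then
      pvMach G f ((nm, entries, i + 1) :: stk) path groups seen flat
    else
      pvMach G f ((nm, entries, i + 1) :: stk) path groups
        (PySem.Set.add seen (entries.getD i "")) (flat ++ [entries.getD i ""])

def resolve_group_py_alt (group_name : String) (all_groups : List (String × List String))
    (_expanding : Option (List String)) : List String × List String :=
  if PySem.Set.contains (pvExp0 _expanding) group_name then ([], [])
    -- ^ unreachable under Pre_ (there B raises ValueError)
  else
    match pvMach (PySem.Dict.mk all_groups) (pvFuel all_groups)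
        [(group_name, PySem.Dict.getD (PySem.Dict.mk all_groups) group_name [], 0)]
        (PySem.Set.add (pvExp0 _expanding) group_name)
        (PySem.Set.ofList [group_name]) PySem.Set.empty [] with
    | some r => r
    | none => ([], [])   -- unreachable under Pre_ (there B raises ValueError)

-- ===== PRECONDITION & SPEC =====
-- graph helpers for Pre_: key-to-key edges, one saturation step, iterated reachability
def pvSuccs (G : PySem.Dict String (List String)) (g : String) : List String :=
  (PySem.Dict.getD G g []).filter (fun e => PySem.Dict.contains G e)

def pvStep (G : PySem.Dict String (List String)) (S : List String) : List String :=
  PySem.List.dedup (S ++ S.flatMap (pvSuccs G))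

def pvIter (G : PySem.Dict String (List String)) : Nat → List String → List String
  | 0, S => S
  | n + 1, S => pvIter G n (pvStep G S)

-- nodes reachable from g (g included); nodes reachable from g by at least one edge
def pvReachStar (G : PySem.Dict String (List String)) (g : String) : List String :=
  pvIter G (PySem.Dict.size G + 1) [g]

def pvReachPlus (G : PySem.Dict String (List String)) (g : String) : List String :=
  pvIter G (PySem.Dict.size G + 1) (PySem.List.dedup (pvSuccs G g))

-- Pre_ excludes exactly the inputs on which A raises ValueError (a circular group
-- reference, or a reachable group already listed in _expanding); B raises there too.
def Pre_resolve_group_py (group_name : String) (all_groups : List (String × List String))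
    (_expanding : Option (List String)) : Prop :=
  ∀ k ∈ pvReachStar (PySem.Dict.mk all_groups) group_name,
    k ∉ pvExp0 _expanding ∧ k ∉ pvReachPlus (PySem.Dict.mk all_groups) k

instance (group_name : String) (all_groups : List (String × List String)) (_expanding : Option (List String)) : Decidable (Pre_resolve_group_py group_name all_groups _expanding) := by unfold Pre_resolve_group_py; infer_instance

def pvWitness_resolve_group_py : String × (List (String × List String)) × Option (List String) :=
  ("web", [("web", ["flask", "base", "gunicorn"]), ("base", ["requests", "flask"])], some ["dev"])

def Spec_resolve_group_py (group_name : String) (all_groups : List (String × List String)) (_expanding : Option (List String)) (out : List String × List String) : Prop := out = resolve_group_py_alt group_name all_groups _expanding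
instance (group_name : String) (all_groups : List (String × List String)) (_expanding : Option (List String)) (out : List String × List String) : Decidable (Spec_resolve_group_py group_name all_groups _expanding out) := by unfold Spec_resolve_group_py; infer_instance

-- ===== CLAIM (what is proved, stated in full; the proofs are below) =====
def Claim_equal_resolve_group_py : Prop := ∀ (group_name : String) (all_groups : List (String × List String)) (_expanding : Option (List String)), Dom_resolve_group_py group_name all_groups _expanding → Pre_resolve_group_py group_name all_groups _expanding → Spec_resolve_group_py group_name all_groups _expanding (resolve_group_py group_name all_groups _expanding)

-- ===== LEMMAS AND PROOFS =====

-- ---- first-occurrence dedup: pvPD s xs = the elements of xs not in s, first occurrences only ----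
def pvPD (s : PySem.Set String) : List String → List String
  | [] => []
  | x :: xs => if x ∈ s then pvPD s xs else x :: pvPD (s ++ [x]) xs

theorem pv_foldl_dedupStep (xs : List String) (s : PySem.Set String) (f : List String) :
    xs.foldl pvDedupStep (s, f) = (PySem.Set.update s xs, f ++ pvPD s xs) := by
  induction xs generalizing s f with
  | nil => simp [pvPD, PySem.Set.update]
  | cons x xs ih =>
    by_cases hx : x ∈ s
    · simp [pvDedupStep, List.foldl_cons, pvPD, hx, (PySem.Set.contains_iff _ _).2 hx,
        PySem.Set.update_cons, PySem.Set.add_of_mem hx, ih]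
    · have hc : PySem.Set.contains s x = false := by
        by_contra h
        exact hx ((PySem.Set.contains_iff _ _).1 (by simpa using h))
      simp [pvDedupStep, List.foldl_cons, pvPD, hx, hc, PySem.Set.update_cons,
        PySem.Set.add_of_not_mem hx, ih]

theorem pv_pvPD_pvPD (xs : List String) (s t : PySem.Set String) (h : ∀ y ∈ t, y ∈ s) :
    pvPD s (pvPD t xs) = pvPD s xs := by
  induction xs generalizing s t with
  | nil => simp [pvPD]
  | cons x xs ih =>
    by_cases hxt : x ∈ t
    · simp [pvPD, hxt, h x hxt, ih s t h]
    · by_cases hxs : x ∈ s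
      · have hsub : ∀ y ∈ t ++ [x], y ∈ s := by
          intro y hy; rcases List.mem_append.1 hy with hy | hy
          · exact h y hy
          · simpa using (by simpa using hy) ▸ hxs
        simp [pvPD, hxt, hxs, ih s (t ++ [x]) hsub]
      · have hsub : ∀ y ∈ t ++ [x], y ∈ s ++ [x] := by
          intro y hy; rcases List.mem_append.1 hy with hy | hy
          · exact List.mem_append.2 (Or.inl (h y hy))
          · exact List.mem_append.2 (Or.inr hy)
        simp [pvPD, hxt, hxs, ih (s ++ [x]) (t ++ [x]) hsub]

theorem pv_update_pvPD (xs : List String) (s t : PySem.Set String) (h : ∀ y ∈ t, y ∈ s) :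
    PySem.Set.update s (pvPD t xs) = PySem.Set.update s xs := by
  induction xs generalizing s t with
  | nil => simp [pvPD]
  | cons x xs ih =>
    by_cases hxt : x ∈ t
    · simp [pvPD, hxt, PySem.Set.update_cons, PySem.Set.add_of_mem (h x hxt), ih s t h]
    · by_cases hxs : x ∈ s
      · have hsub : ∀ y ∈ t ++ [x], y ∈ s := by
          intro y hy; rcases List.mem_append.1 hy with hy | hy
          · exact h y hy
          · simpa using (by simpa using hy) ▸ hxs
        simp [pvPD, hxt, hxs, PySem.Set.update_cons, PySem.Set.add_of_mem hxs,
          ih s (t ++ [x]) hsub]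
      · have hsub : ∀ y ∈ t ++ [x], y ∈ s ++ [x] := by
          intro y hy; rcases List.mem_append.1 hy with hy | hy
          · exact List.mem_append.2 (Or.inl (h y hy))
          · exact List.mem_append.2 (Or.inr hy)
        simp [pvPD, hxt, hxs, PySem.Set.update_cons, PySem.Set.add_of_not_mem hxs,
          ih (s ++ [x]) (t ++ [x]) hsub]

-- folding a list already deduped from scratch equals folding the raw list
theorem pv_foldl_dedup_absorb (xs : List String) (st : PySem.Set String × List String) :
    ((xs.foldl pvDedupStep (PySem.Set.empty, [])).2).foldl pvDedupStep st
      = xs.foldl pvDedupStep st := by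
  have h0 : (xs.foldl pvDedupStep (PySem.Set.empty, [])).2 = pvPD [] xs := by
    simp [pv_foldl_dedupStep, PySem.Set.empty]
  obtain ⟨s, f⟩ := st
  have htriv : ∀ y ∈ ([] : List String), y ∈ s := by intro y hy; simp at hy
  rw [h0, pv_foldl_dedupStep, pv_foldl_dedupStep,
    pv_pvPD_pvPD xs s [] htriv, pv_update_pvPD xs s [] htriv]

-- ---- unfolding equations ----
theorem pvResolveA_succ (G : PySem.Dict String (List String)) (f : Nat) (g : String)
    (exp : PySem.Set String) :
    pvResolveA G (f + 1) g exp =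
      if PySem.Set.contains exp g then none
      else
        match pvLoopA G (fun e => pvResolveA G f e (PySem.Set.add exp g))
            (PySem.Dict.getD G g []) (PySem.Set.ofList [g], PySem.Set.empty, []) with
        | none => none
        | some (eg, _, flat) => some (flat, eg) := rfl

theorem pvMach_nil (G : PySem.Dict String (List String)) (f : Nat) (path groups seen : PySem.Set String)
    (flat : List String) :
    pvMach G (f + 1) [] path groups seen flat = some (flat, groups) := rfl

theorem pvMach_cons (G : PySem.Dict String (List String)) (f : Nat) (nm : String)
    (entries : List String) (i : Nat) (stk : List (String × List String × Nat))
    (path groups seen : PySem.Set String) (flat : List String) :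
    pvMach G (f + 1) ((nm, entries, i) :: stk) path groups seen flat =
      if i = entries.length then
        pvMach G f stk (PySem.Set.discard path nm) groups seen flat
      else if PySem.Dict.contains G (entries.getD i "") then
        if PySem.Set.contains path (entries.getD i "") then none
        else
          pvMach G f ((entries.getD i "", PySem.Dict.getD G (entries.getD i "") [], 0)
              :: (nm, entries, i + 1) :: stk)
            (PySem.Set.add path (entries.getD i ""))
            (PySem.Set.add groups (entries.getD i "")) seen flat
      else if PySem.Set.contains seen (entries.getD i "") then
        pvMach G f ((nm, entries, i + 1) :: stk) path groups seen flat
      else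
        pvMach G f ((nm, entries, i + 1) :: stk) path groups
          (PySem.Set.add seen (entries.getD i "")) (flat ++ [entries.getD i ""]) := rfl

-- ---- machine fuel monotonicity ----
theorem pvMach_mono (G : PySem.Dict String (List String)) :
    ∀ f stk path groups seen flat r, pvMach G f stk path groups seen flat = some r →
      pvMach G (f + 1) stk path groups seen flat = some r := by
  intro f
  induction f with
  | zero => intro stk path groups seen flat r h; simp [pvMach] at h
  | succ f ih =>
    intro stk path groups seen flat r h
    match stk with
    | [] => simpa [pvMach_nil] using h
    | (nm, entries, i) :: stk =>
      rw [pvMach_cons] at h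
      rw [pvMach_cons]
      split_ifs at h ⊢ with h1 h2 h3 h4
      all_goals first
        | exact ih _ _ _ _ _ _ h
        | (exfalso; exact Option.noConfusion h)

theorem pvMach_mono_le (G : PySem.Dict String (List String)) :
    ∀ f' f, f ≤ f' → ∀ stk path groups seen flat r,
      pvMach G f stk path groups seen flat = some r →
      pvMach G f' stk path groups seen flat = some r := by
  intro f'
  induction f' with
  | zero =>
    intro f hle stk path groups seen flat r h
    have : f = 0 := by omega
    subst this; exact h
  | succ n ih =>
    intro f hle stk path groups seen flat r h
    by_cases hf : f = n + 1
    · subst hf; exact h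
    · exact pvMach_mono G n _ _ _ _ _ _ (ih f (by omega) _ _ _ _ _ _ h)

-- ---- small Set facts used by the simulation ----
theorem pv_add_add (s : PySem.Set String) (x : String) :
    PySem.Set.add (PySem.Set.add s x) x = PySem.Set.add s x := by
  have : x ∈ PySem.Set.add s x := (PySem.Set.mem_add _ _ _).2 (Or.inr rfl)
  exact PySem.Set.add_of_mem this

theorem pv_update_add (a b : PySem.Set String) (x : String) :
    PySem.Set.update a (PySem.Set.add b x) = PySem.Set.add (PySem.Set.update a b) x := by
  by_cases hx : x ∈ b
  · rw [PySem.Set.add_of_mem hx, PySem.Set.add_of_mem]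
    exact (PySem.Set.mem_update _ _ _).2 (Or.inr hx)
  · rw [PySem.Set.add_of_not_mem hx]
    show List.foldl PySem.Set.add a (b ++ [x]) = _
    rw [List.foldl_append]
    rfl

theorem pv_update_assoc (a b : PySem.Set String) (c : List String) :
    PySem.Set.update a (PySem.Set.update b c) = PySem.Set.update (PySem.Set.update a b) c := by
  induction c generalizing b with
  | nil => rfl
  | cons x c ih =>
    rw [PySem.Set.update_cons, PySem.Set.update_cons, ih (PySem.Set.add b x), pv_update_add]

theorem pv_union_head (t : List String) : ∀ (s : PySem.Set String) (x : String),
    ∃ r, PySem.Set.update (x :: s) t = x :: r := by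
  induction t with
  | nil => intro s x; exact ⟨s, rfl⟩
  | cons y t ih =>
    intro s x
    rw [PySem.Set.update_cons]
    by_cases hy : y ∈ (x :: s : List String)
    · rw [PySem.Set.add_of_mem hy]; exact ih s x
    · rw [PySem.Set.add_of_not_mem hy]
      exact ih (s ++ [y]) x

theorem pv_discard_add (exp : PySem.Set String) (g : String) (hg : g ∉ exp) :
    PySem.Set.discard (PySem.Set.add exp g) g = exp := by
  rw [PySem.Set.add_of_not_mem hg]
  show List.filter _ (exp ++ [g]) = exp
  rw [List.filter_append]
  have h1 : List.filter (fun y => !y == g) exp = exp := by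
    apply List.filter_eq_self.2
    intro a ha
    simp only [Bool.not_eq_eq_eq_not, Bool.not_true, beq_eq_false_iff_ne]
    exact fun hag => hg (hag ▸ ha)
  have h2 : List.filter (fun y => !y == g) [g] = [] := by simp
  rw [h1, h2, List.append_nil]

-- ---- shape of A's loop results: group set is nodup with the call's group first;
-- ---- the (seen, flat) pair is a from-scratch dedup fold ----
theorem pvLoopA_shape (G : PySem.Dict String (List String))
    (rec : String → Option (List String × PySem.Set String)) :
    ∀ entries st out, pvLoopA G rec entries st = some out →
      (st.1.Nodup → out.1.Nodup) ∧ (∀ x s', st.1 = x :: s' → ∃ r, out.1 = x :: r) ∧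
      (∀ L : List String, (st.2.1, st.2.2) = L.foldl pvDedupStep (PySem.Set.empty, []) →
        ∃ L' : List String, (out.2.1, out.2.2) = L'.foldl pvDedupStep (PySem.Set.empty, [])) := by
  intro entries
  induction entries with
  | nil =>
    intro st out h
    have : out = st := by simpa [pvLoopA] using h.symm
    subst this
    exact ⟨fun h => h, fun x s' hx => ⟨s', hx⟩, fun L hL => ⟨L, hL⟩⟩
  | cons e rest ih =>
    intro st out h
    by_cases hk : PySem.Dict.contains G e
    · rcases hrec : rec e with _ | r
      · simp [pvLoopA, hk, hrec] at h
      · obtain ⟨sp, sg⟩ := r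
        simp only [pvLoopA, hk, if_true, hrec] at h
        obtain ⟨h1, h2, h3⟩ := ih _ _ h
        refine ⟨fun hnd => h1 (PySem.Set.nodup_update st.1 sg hnd), ?_, ?_⟩
        · intro x s' hx
          obtain ⟨r, hr⟩ := pv_union_head sg s' x
          refine h2 x r ?_
          show PySem.Set.union st.1 sg = x :: r
          rw [hx]
          exact hr
        · intro L hL
          refine h3 (L ++ sp) ?_
          show ((sp.foldl pvDedupStep (st.2.1, st.2.2)).1,
              (sp.foldl pvDedupStep (st.2.1, st.2.2)).2) = _
          rw [List.foldl_append, ← hL]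
    · simp only [pvLoopA, hk, Bool.false_eq_true, if_false] at h
      obtain ⟨h1, h2, h3⟩ := ih _ _ h
      refine ⟨h1, h2, ?_⟩
      intro L hL
      refine h3 (L ++ [e]) ?_
      show ((pvDedupStep (st.2.1, st.2.2) e).1, (pvDedupStep (st.2.1, st.2.2) e).2) = _
      rw [List.foldl_append, ← hL]
      rfl

theorem pvGA (G : PySem.Dict String (List String)) (f : Nat) (g : String)
    (exp : PySem.Set String) (fa : List String) (ga : PySem.Set String)
    (h : pvResolveA G f g exp = some (fa, ga)) :
    ga.Nodup ∧ (∃ t, ga = g :: t) ∧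
      ∃ s, fa.foldl pvDedupStep (PySem.Set.empty, []) = (s, fa) := by
  match f with
  | 0 => simp [pvResolveA] at h
  | f + 1 =>
    rw [pvResolveA_succ] at h
    by_cases hg : PySem.Set.contains exp g
    · rw [if_pos hg] at h; cases h
    · rw [if_neg hg] at h
      rcases hl : pvLoopA G (fun e => pvResolveA G f e (PySem.Set.add exp g))
          (PySem.Dict.getD G g []) (PySem.Set.ofList [g], PySem.Set.empty, []) with _ | st
      · rw [hl] at h; cases h
      · obtain ⟨eg, sn, fl⟩ := st
        rw [hl] at h
        have heq : fa = fl ∧ ga = eg := by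
          have := Option.some.inj h
          exact ⟨(congrArg Prod.fst this).symm, (congrArg Prod.snd this).symm⟩
        obtain ⟨hfa, hga⟩ := heq
        subst hfa; subst hga
        obtain ⟨h1, h2, h3⟩ := pvLoopA_shape G _ _ _ _ hl
        have hofl : (PySem.Set.ofList [g] : List String) = [g] := rfl
        refine ⟨h1 (by rw [hofl]; simp), h2 g [] hofl, ?_⟩
        obtain ⟨L', hL'⟩ := h3 [] rfl
        refine ⟨(L'.foldl pvDedupStep (PySem.Set.empty, [])).1, ?_⟩
        have hfl : fa = (L'.foldl pvDedupStep (PySem.Set.empty, [])).2 :=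
          congrArg Prod.snd hL'
        calc fa.foldl pvDedupStep (PySem.Set.empty, [])
            = ((L'.foldl pvDedupStep (PySem.Set.empty, [])).2).foldl pvDedupStep
                (PySem.Set.empty, []) := by rw [← hfl]
          _ = L'.foldl pvDedupStep (PySem.Set.empty, []) := pv_foldl_dedup_absorb L' _
          _ = ((L'.foldl pvDedupStep (PySem.Set.empty, [])).1, fa) := by
                rw [hfl]

-- ---- the simulation: A's loop over one group's entries vs the machine ----
theorem pvRUNloop (G : PySem.Dict String (List String)) (B : Nat) (g : String)
    (exp : PySem.Set String) (hg : PySem.Set.contains exp g = false)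
    (recA : String → Option (List String × PySem.Set String))
    (Hrec : ∀ e sp sg, recA e = some (sp, sg) →
      PySem.Set.contains (PySem.Set.add exp g) e = false ∧ (∃ t, sg = e :: t) ∧
      ∃ n ≤ B, ∀ frest stk gset seen flat, e ∈ gset →
        pvMach G (n + frest) ((e, PySem.Dict.getD G e [], 0) :: stk)
            (PySem.Set.add (PySem.Set.add exp g) e) gset seen flat
          = pvMach G frest stk (PySem.Set.add exp g) (PySem.Set.union gset sg)
              (sp.foldl pvDedupStep (seen, flat)).1 (sp.foldl pvDedupStep (seen, flat)).2) :
    ∀ (rest : List String) (egA sA : PySem.Set String) (flA : List String)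
      (egOut sOut : PySem.Set String) (flOut L : List String),
      pvLoopA G recA rest (egA, sA, flA) = some (egOut, sOut, flOut) →
      (sA, flA) = L.foldl pvDedupStep (PySem.Set.empty, []) →
      ∃ m ≤ rest.length * (B + 1) + 1,
        ∀ i, (PySem.Dict.getD G g []).drop i = rest → i ≤ (PySem.Dict.getD G g []).length →
        ∀ frest stk gset0 seen0 flat0, g ∈ gset0 →
          pvMach G (m + frest) ((g, PySem.Dict.getD G g [], i) :: stk) (PySem.Set.add exp g)
              (PySem.Set.union gset0 egA)
              (L.foldl pvDedupStep (seen0, flat0)).1 (L.foldl pvDedupStep (seen0, flat0)).2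
            = pvMach G frest stk exp (PySem.Set.union gset0 egOut)
                (flOut.foldl pvDedupStep (seen0, flat0)).1
                (flOut.foldl pvDedupStep (seen0, flat0)).2 := by
  intro rest
  induction rest with
  | nil =>
    intro egA sA flA egOut sOut flOut L h hL
    have hst : (egA, sA, flA) = (egOut, sOut, flOut) := by simpa [pvLoopA] using h
    have he : egA = egOut := congrArg Prod.fst hst
    have hf : flA = flOut := congrArg (fun p => p.2.2) hst
    refine ⟨1, by omega, ?_⟩
    intro i hdrop hile frest stk gset0 seen0 flat0 hg0
    have hieq : i = (PySem.Dict.getD G g []).length := by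
      have := List.drop_eq_nil_iff.1 hdrop
      omega
    have h1 : 1 + frest = frest + 1 := by omega
    rw [h1, pvMach_cons, if_pos hieq]
    have hgne : g ∉ exp := fun hmem => by
      rw [(PySem.Set.contains_iff _ _).2 hmem] at hg
      cases hg
    rw [pv_discard_add exp g hgne, ← he, ← hf]
    have hfl2 : flA = (L.foldl pvDedupStep (PySem.Set.empty, [])).2 := congrArg Prod.snd hL
    have habs : flA.foldl pvDedupStep (seen0, flat0) = L.foldl pvDedupStep (seen0, flat0) := by
      rw [hfl2, pv_foldl_dedup_absorb]
    rw [habs]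
  | cons e rest ih =>
    intro egA sA flA egOut sOut flOut L h hL
    by_cases hk : PySem.Dict.contains G e
    · -- group entry: one push step, the child's run, then the rest of the loop
      rcases hrec : recA e with _ | r
      · simp [pvLoopA, hk, hrec] at h
      · obtain ⟨sp, sg⟩ := r
        simp only [pvLoopA, hk, if_true, hrec] at h
        obtain ⟨hcpath, ⟨t, hsg⟩, n, hnB, Hc⟩ := Hrec e sp sg hrec
        obtain ⟨m', hm', IH⟩ := ih (PySem.Set.union egA sg)
            (sp.foldl pvDedupStep (sA, flA)).1 (sp.foldl pvDedupStep (sA, flA)).2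
            egOut sOut flOut (L ++ sp) h
            (by show ((sp.foldl pvDedupStep (sA, flA)).1, (sp.foldl pvDedupStep (sA, flA)).2) = _
                rw [List.foldl_append, ← hL])
        refine ⟨n + m' + 1, ?_, ?_⟩
        · have h1 : n + m' ≤ B + (rest.length * (B + 1) + 1) := Nat.add_le_add hnB hm'
          have h2 : (e :: rest).length * (B + 1) + 1 = B + (rest.length * (B + 1) + 1) + 1 := by
            simp [List.length_cons, Nat.succ_mul]
            ring
          omega
        · intro i hdrop hile frest stk gset0 seen0 flat0 hg0
          have hilt : i < (PySem.Dict.getD G g []).length := by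
            rcases Nat.lt_or_ge i (PySem.Dict.getD G g []).length with hlt | hge
            · exact hlt
            · rw [List.drop_eq_nil_iff.2 hge] at hdrop; cases hdrop
          have hcons : (PySem.Dict.getD G g []).drop i
              = (PySem.Dict.getD G g [])[i] :: (PySem.Dict.getD G g []).drop (i + 1) :=
            List.drop_eq_getElem_cons hilt
          rw [hdrop] at hcons
          injection hcons with hei0 hdr0
          have hei : (PySem.Dict.getD G g []).getD i "" = e := by
            rw [List.getD_eq_getElem _ "" hilt, ← hei0]
          have hdrop' : (PySem.Dict.getD G g []).drop (i + 1) = rest := hdr0.symm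
          have hfuel : n + m' + 1 + frest = n + (m' + frest) + 1 := by omega
          rw [hfuel, pvMach_cons, if_neg (by omega), hei, if_pos hk, if_neg (by rw [hcpath]; simp)]
          have hmem_e : e ∈ PySem.Set.add (PySem.Set.union gset0 egA) e :=
            (PySem.Set.mem_add _ _ _).2 (Or.inr rfl)
          rw [Hc (m' + frest) ((g, PySem.Dict.getD G g [], i + 1) :: stk) _ _ _ hmem_e]
          have hgset : PySem.Set.union (PySem.Set.add (PySem.Set.union gset0 egA) e) sg
              = PySem.Set.union gset0 (PySem.Set.union egA sg) := by
            show PySem.Set.update (PySem.Set.add (PySem.Set.update gset0 egA) e) sg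
              = PySem.Set.update gset0 (PySem.Set.update egA sg)
            rw [pv_update_assoc gset0 egA sg, hsg, PySem.Set.update_cons,
              PySem.Set.update_cons, pv_add_add]
          have hsf : sp.foldl pvDedupStep
              ((L.foldl pvDedupStep (seen0, flat0)).1, (L.foldl pvDedupStep (seen0, flat0)).2)
              = ((L ++ sp).foldl pvDedupStep (seen0, flat0)) := by
            rw [List.foldl_append]
          rw [hgset]
          have hIH := IH (i + 1) hdrop' (by omega) frest stk gset0 seen0 flat0 hg0
          rw [← hsf] at hIH
          exact hIH
    · -- literal entry: one dedup step, then the rest of the loop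
      simp only [pvLoopA, hk, Bool.false_eq_true, if_false] at h
      obtain ⟨m', hm', IH⟩ := ih egA (pvDedupStep (sA, flA) e).1 (pvDedupStep (sA, flA) e).2
          egOut sOut flOut (L ++ [e]) h
          (by show ((pvDedupStep (sA, flA) e).1, (pvDedupStep (sA, flA) e).2) = _
              rw [List.foldl_append, ← hL]
              rfl)
      refine ⟨m' + 1, ?_, ?_⟩
      · have h2 : (e :: rest).length * (B + 1) + 1 = rest.length * (B + 1) + (B + 1) + 1 := by
          simp [List.length_cons, Nat.succ_mul]
        omega
      · intro i hdrop hile frest stk gset0 seen0 flat0 hg0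
        have hilt : i < (PySem.Dict.getD G g []).length := by
          rcases Nat.lt_or_ge i (PySem.Dict.getD G g []).length with hlt | hge
          · exact hlt
          · rw [List.drop_eq_nil_iff.2 hge] at hdrop; cases hdrop
        have hcons : (PySem.Dict.getD G g []).drop i
            = (PySem.Dict.getD G g [])[i] :: (PySem.Dict.getD G g []).drop (i + 1) :=
          List.drop_eq_getElem_cons hilt
        rw [hdrop] at hcons
        injection hcons with hei0 hdr0
        have hei : (PySem.Dict.getD G g []).getD i "" = e := by
          rw [List.getD_eq_getElem _ "" hilt, ← hei0]
        have hdrop' : (PySem.Dict.getD G g []).drop (i + 1) = rest := hdr0.symm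
        have hfuel : m' + 1 + frest = m' + frest + 1 := by omega
        rw [hfuel, pvMach_cons, if_neg (by omega), hei, if_neg hk]
        have hstep : (L ++ [e]).foldl pvDedupStep (seen0, flat0)
            = pvDedupStep (L.foldl pvDedupStep (seen0, flat0)) e := by
          rw [List.foldl_append]
          rfl
        have hIH := IH (i + 1) hdrop' (by omega) frest stk gset0 seen0 flat0 hg0
        rw [hstep] at hIH
        by_cases hce : PySem.Set.contains (L.foldl pvDedupStep (seen0, flat0)).1 e
        · rw [if_pos hce]
          have hid : pvDedupStep (L.foldl pvDedupStep (seen0, flat0)) e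
              = L.foldl pvDedupStep (seen0, flat0) := by
            simp only [pvDedupStep, hce, if_true]
          rw [hid] at hIH
          exact hIH
        · rw [if_neg hce]
          have hnew : pvDedupStep (L.foldl pvDedupStep (seen0, flat0)) e
              = (PySem.Set.add (L.foldl pvDedupStep (seen0, flat0)).1 e,
                 (L.foldl pvDedupStep (seen0, flat0)).2 ++ [e]) := by
            simp only [pvDedupStep, hce, Bool.false_eq_true, if_false]
          rw [hnew] at hIH
          exact hIH

-- length * (per-child bound + 1) + 1 fits under the next power of W
theorem pvBound (len W f : Nat) (h : len + 2 ≤ W) :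
    len * (W ^ (f + 1) + 1) + 1 ≤ W ^ (f + 2) := by
  obtain ⟨d, hd⟩ := Nat.exists_eq_add_of_le h
  have hP : W ≤ W ^ (f + 1) := Nat.le_self_pow (by omega) W
  have h1 : W ^ (f + 2) = (len + 2 + d) * W ^ (f + 1) := by rw [← hd]; ring
  have h2 : len + 1 ≤ W ^ (f + 1) := le_trans (by omega) hP
  calc len * (W ^ (f + 1) + 1) + 1 = len * W ^ (f + 1) + (len + 1) := by ring
    _ ≤ len * W ^ (f + 1) + W ^ (f + 1) := by omega
    _ = (len + 1) * W ^ (f + 1) := by ring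
    _ ≤ (len + 2 + d) * W ^ (f + 1) := Nat.mul_le_mul_right _ (by omega)
    _ = W ^ (f + 2) := h1.symm

-- one level of A's recursion vs the machine, given the simulation for the children
theorem pvRUNcore (G : PySem.Dict String (List String)) (W : Nat)
    (HW : ∀ gname : String, (PySem.Dict.getD G gname []).length + 2 ≤ W)
    (B f : Nat) (g : String) (exp : PySem.Set String) (fa : List String)
    (ga : PySem.Set String) (hBW : B ≤ W ^ (f + 1))
    (h : pvResolveA G (f + 1) g exp = some (fa, ga))
    (Hrec : ∀ e sp sg, pvResolveA G f e (PySem.Set.add exp g) = some (sp, sg) →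
      PySem.Set.contains (PySem.Set.add exp g) e = false ∧ (∃ t, sg = e :: t) ∧
      ∃ n ≤ B, ∀ frest stk gset seen flat, e ∈ gset →
        pvMach G (n + frest) ((e, PySem.Dict.getD G e [], 0) :: stk)
            (PySem.Set.add (PySem.Set.add exp g) e) gset seen flat
          = pvMach G frest stk (PySem.Set.add exp g) (PySem.Set.union gset sg)
              (sp.foldl pvDedupStep (seen, flat)).1 (sp.foldl pvDedupStep (seen, flat)).2) :
    PySem.Set.contains exp g = false ∧ (∃ t, ga = g :: t) ∧
      ∃ n ≤ W ^ (f + 2), ∀ frest stk gset seen flat, g ∈ gset →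
        pvMach G (n + frest) ((g, PySem.Dict.getD G g [], 0) :: stk)
            (PySem.Set.add exp g) gset seen flat
          = pvMach G frest stk exp (PySem.Set.union gset ga)
              (fa.foldl pvDedupStep (seen, flat)).1 (fa.foldl pvDedupStep (seen, flat)).2 := by
  have hhd := pvGA G (f + 1) g exp fa ga h
  rw [pvResolveA_succ] at h
  by_cases hgc : PySem.Set.contains exp g
  · rw [if_pos hgc] at h; cases h
  · rw [if_neg hgc] at h
    have hg : PySem.Set.contains exp g = false := by
      cases hco : PySem.Set.contains exp g
      · rfl
      · exact absurd hco hgc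
    rcases hl : pvLoopA G (fun e => pvResolveA G f e (PySem.Set.add exp g))
        (PySem.Dict.getD G g []) (PySem.Set.ofList [g], PySem.Set.empty, []) with _ | st
    · rw [hl] at h; cases h
    · obtain ⟨eg, sn, fl⟩ := st
      rw [hl] at h
      have hfa : fa = fl := (congrArg Prod.fst (Option.some.inj h)).symm
      have hga : ga = eg := (congrArg Prod.snd (Option.some.inj h)).symm
      subst hfa; subst hga
      obtain ⟨m, hm, HM⟩ := pvRUNloop G B g exp hg
        (fun e => pvResolveA G f e (PySem.Set.add exp g)) Hrec
        (PySem.Dict.getD G g []) (PySem.Set.ofList [g]) PySem.Set.empty []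
        ga sn fa [] hl rfl
      refine ⟨hg, hhd.2.1, m, ?_, ?_⟩
      · calc m ≤ (PySem.Dict.getD G g []).length * (B + 1) + 1 := hm
          _ ≤ (PySem.Dict.getD G g []).length * (W ^ (f + 1) + 1) + 1 := by
              have := Nat.mul_le_mul_left (PySem.Dict.getD G g []).length
                (Nat.add_le_add_right hBW 1)
              omega
          _ ≤ W ^ (f + 2) := pvBound _ W f (HW g)
      · intro frest stk gset seen flat hgset
        have hu : PySem.Set.union gset (PySem.Set.ofList [g]) = gset := by
          show PySem.Set.add gset g = gset
          exact PySem.Set.add_of_mem hgset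
        have := HM 0 (by simp) (by omega) frest stk gset seen flat hgset
        rw [hu] at this
        exact this

-- ---- A returns ⇒ the machine simulates it (with a fuel bound) ----
theorem pvRUN (G : PySem.Dict String (List String)) (W : Nat)
    (HW : ∀ gname : String, (PySem.Dict.getD G gname []).length + 2 ≤ W) :
    ∀ f g exp fa ga, pvResolveA G (f + 1) g exp = some (fa, ga) →
      PySem.Set.contains exp g = false ∧ (∃ t, ga = g :: t) ∧
      ∃ n ≤ W ^ (f + 2), ∀ frest stk gset seen flat, g ∈ gset →
        pvMach G (n + frest) ((g, PySem.Dict.getD G g [], 0) :: stk)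
            (PySem.Set.add exp g) gset seen flat
          = pvMach G frest stk exp (PySem.Set.union gset ga)
              (fa.foldl pvDedupStep (seen, flat)).1 (fa.foldl pvDedupStep (seen, flat)).2 := by
  intro f
  induction f with
  | zero =>
    intro g exp fa ga h
    exact pvRUNcore G W HW (W ^ 1) 0 g exp fa ga (le_refl _) h
      (fun e sp sg hre => by simp [pvResolveA] at hre)
  | succ f ih =>
    intro g exp fa ga h
    exact pvRUNcore G W HW (W ^ (f + 2)) (f + 1) g exp fa ga (le_refl _) h
      (fun e sp sg hre => ih e (PySem.Set.add exp g) sp sg hre)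

-- ---- reachability library ----
theorem pv_mem_pvStep (G : PySem.Dict String (List String)) (S : List String) (x : String) :
    x ∈ pvStep G S ↔ x ∈ S ∨ ∃ a ∈ S, x ∈ pvSuccs G a := by
  simp [pvStep, PySem.List.mem_dedup, List.mem_append, List.mem_flatMap]

theorem pv_pvStep_congr (G : PySem.Dict String (List String)) (S T : List String)
    (h : ∀ x, x ∈ S ↔ x ∈ T) : ∀ x, x ∈ pvStep G S ↔ x ∈ pvStep G T := by
  intro x
  simp only [pv_mem_pvStep]
  constructor
  · rintro (hx | ⟨a, ha, hx⟩)
    · exact Or.inl ((h x).1 hx)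
    · exact Or.inr ⟨a, (h a).1 ha, hx⟩
  · rintro (hx | ⟨a, ha, hx⟩)
    · exact Or.inl ((h x).2 hx)
    · exact Or.inr ⟨a, (h a).2 ha, hx⟩

theorem pv_pvIter_congr (G : PySem.Dict String (List String)) :
    ∀ n (S T : List String), (∀ x, x ∈ S ↔ x ∈ T) →
      ∀ x, x ∈ pvIter G n S ↔ x ∈ pvIter G n T := by
  intro n
  induction n with
  | zero => intro S T h x; simpa [pvIter] using h x
  | succ n ih =>
    intro S T h x
    exact (ih (pvStep G S) (pvStep G T) (pv_pvStep_congr G S T h)) x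

theorem pv_subset_pvIter (G : PySem.Dict String (List String)) :
    ∀ n (S : List String) x, x ∈ S → x ∈ pvIter G n S := by
  intro n
  induction n with
  | zero => intro S x hx; simpa [pvIter] using hx
  | succ n ih =>
    intro S x hx
    exact ih (pvStep G S) x ((pv_mem_pvStep G S x).2 (Or.inl hx))

theorem pv_pvIter_stable (G : PySem.Dict String (List String)) :
    ∀ n (S : List String), (∀ x ∈ pvStep G S, x ∈ S) →
      ∀ x, x ∈ pvIter G n S ↔ x ∈ S := by
  intro n
  induction n with
  | zero => intro S _ x; simp [pvIter]
  | succ n ih =>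
    intro S h x
    have hst : ∀ y, y ∈ pvStep G S ↔ y ∈ S := by
      intro y
      exact ⟨h y, fun hy => (pv_mem_pvStep G S y).2 (Or.inl hy)⟩
    calc x ∈ pvIter G n (pvStep G S) ↔ x ∈ pvIter G n S := pv_pvIter_congr G n _ _ hst x
      _ ↔ x ∈ S := ih S h x

theorem pv_succs_subset_keys (G : PySem.Dict String (List String)) (a x : String)
    (hx : x ∈ pvSuccs G a) : x ∈ PySem.Dict.keys G := by
  simp only [pvSuccs, List.mem_filter] at hx
  exact (PySem.Dict.contains_iff_mem_keys _ _).1 (by simpa using hx.2)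

theorem pv_pvIter_closed (G : PySem.Dict String (List String)) :
    ∀ (n : Nat) (S : List String) (F : Finset String), S.Nodup →
      (∀ x ∈ S, x ∈ F) → (∀ k ∈ PySem.Dict.keys G, k ∈ F) →
      F.card ≤ S.toFinset.card + n →
      ∀ x ∈ pvStep G (pvIter G n S), x ∈ pvIter G n S := by
  intro n
  induction n with
  | zero =>
    intro S F _ hSF hKF hcard x hx
    have hsub : S.toFinset ⊆ F := fun z hz => hSF z (List.mem_toFinset.1 hz)
    have hSeq : S.toFinset = F := Finset.eq_of_subset_of_card_le hsub (by simpa using hcard)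
    simp only [pvIter] at hx ⊢
    rcases (pv_mem_pvStep G S x).1 hx with hx | ⟨a, _, hx⟩
    · exact hx
    · have hxF : x ∈ F := hKF x (pv_succs_subset_keys G a x hx)
      rw [← hSeq] at hxF
      exact List.mem_toFinset.1 hxF
  | succ n ih =>
    intro S F hnd hSF hKF hcard
    by_cases hc : ∀ x ∈ pvStep G S, x ∈ S
    · intro x hx
      simp only [pvIter] at hx ⊢
      have h1 : ∀ z, z ∈ pvStep G S ↔ z ∈ S :=
        fun z => ⟨hc z, fun hz => (pv_mem_pvStep G S z).2 (Or.inl hz)⟩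
      have hproj : ∀ y, y ∈ pvIter G n (pvStep G S) ↔ y ∈ S := by
        intro y
        calc y ∈ pvIter G n (pvStep G S) ↔ y ∈ pvIter G n S := pv_pvIter_congr G n _ _ h1 y
          _ ↔ y ∈ S := pv_pvIter_stable G n S hc y
      have hx' : x ∈ pvStep G S := (pv_pvStep_congr G _ S hproj x).1 hx
      exact (hproj x).2 (hc x hx')
    · push_neg at hc
      obtain ⟨y, hy, hyn⟩ := hc
      have hsub : S.toFinset ⊆ (pvStep G S).toFinset := fun z hz =>
        List.mem_toFinset.2 ((pv_mem_pvStep G S z).2 (Or.inl (List.mem_toFinset.1 hz)))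
      have hss : S.toFinset ⊂ (pvStep G S).toFinset :=
        ⟨hsub, fun hcon => hyn (List.mem_toFinset.1 (hcon (List.mem_toFinset.2 hy)))⟩
      have hlt : S.toFinset.card < (pvStep G S).toFinset.card := Finset.card_lt_card hss
      simp only [pvIter]
      refine ih (pvStep G S) F (by simpa [pvStep] using PySem.List.nodup_dedup _) ?_ hKF (by omega)
      intro x hx
      rcases (pv_mem_pvStep G S x).1 hx with hx | ⟨a, _, hx⟩
      · exact hSF x hx
      · exact hKF x (pv_succs_subset_keys G a x hx)

theorem pv_mem_pvReachStar_self (G : PySem.Dict String (List String)) (g : String) :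
    g ∈ pvReachStar G g :=
  pv_subset_pvIter G _ [g] g (by simp)

theorem pv_keys_length (G : PySem.Dict String (List String)) :
    (PySem.Dict.keys G).length = PySem.Dict.size G := by
  simp [PySem.Dict.keys, PySem.Dict.size]

theorem pv_pvReachStar_closed (G : PySem.Dict String (List String)) (g a e : String)
    (ha : a ∈ pvReachStar G g) (he : e ∈ pvSuccs G a) : e ∈ pvReachStar G g := by
  have hstep : e ∈ pvStep G (pvReachStar G g) :=
    (pv_mem_pvStep G _ e).2 (Or.inr ⟨a, ha, he⟩)
  refine pv_pvIter_closed G (PySem.Dict.size G + 1) [g]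
    (insert g (PySem.Dict.keys G).toFinset) (by simp) ?_ ?_ ?_ e hstep
  · intro x hx; simp at hx; simp [hx]
  · intro k hk; exact Finset.mem_insert_of_mem (List.mem_toFinset.2 hk)
  · have h1 : (insert g (PySem.Dict.keys G).toFinset).card ≤ (PySem.Dict.keys G).toFinset.card + 1 :=
      Finset.card_insert_le _ _
    have h2 : (PySem.Dict.keys G).toFinset.card ≤ (PySem.Dict.keys G).length :=
      List.toFinset_card_le _
    have h3 := pv_keys_length G
    have h4 : ([g] : List String).toFinset.card = 1 := by simp
    omega

theorem pv_succs_mem_pvReachPlus (G : PySem.Dict String (List String)) (g e : String)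
    (he : e ∈ pvSuccs G g) : e ∈ pvReachPlus G g :=
  pv_subset_pvIter G _ _ e (by simpa [PySem.List.mem_dedup] using he)

theorem pv_pvReachPlus_closed (G : PySem.Dict String (List String)) (g a e : String)
    (ha : a ∈ pvReachPlus G g) (he : e ∈ pvSuccs G a) : e ∈ pvReachPlus G g := by
  have hstep : e ∈ pvStep G (pvReachPlus G g) :=
    (pv_mem_pvStep G _ e).2 (Or.inr ⟨a, ha, he⟩)
  refine pv_pvIter_closed G (PySem.Dict.size G + 1) (PySem.List.dedup (pvSuccs G g))
    (PySem.Dict.keys G).toFinset (PySem.List.nodup_dedup _) ?_ ?_ ?_ e hstep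
  · intro x hx
    exact List.mem_toFinset.2
      (pv_succs_subset_keys G g x ((PySem.List.mem_dedup _ _).1 hx))
  · intro k hk; exact List.mem_toFinset.2 hk
  · have h2 : (PySem.Dict.keys G).toFinset.card ≤ (PySem.Dict.keys G).length :=
      List.toFinset_card_le _
    have h3 := pv_keys_length G
    omega

-- ---- totality of port A under Pre_ ----
def pvRem (G : PySem.Dict String (List String)) (exp : PySem.Set String) : Nat :=
  ((PySem.List.dedup (PySem.Dict.keys G)).filter (fun k => decide (k ∉ exp))).length

theorem pvRem_lt (G : PySem.Dict String (List String)) (exp : PySem.Set String) (g : String)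
    (hkey : g ∈ PySem.Dict.keys G) (hnot : g ∉ exp) :
    pvRem G (PySem.Set.add exp g) < pvRem G exp := by
  unfold pvRem
  have hfe : (PySem.List.dedup (PySem.Dict.keys G)).filter (fun k => decide (k ∉ PySem.Set.add exp g))
      = ((PySem.List.dedup (PySem.Dict.keys G)).filter (fun k => decide (k ∉ exp))).filter
          (fun k => decide (k ≠ g)) := by
    rw [List.filter_filter]
    apply List.filter_congr
    intro x _
    by_cases h1 : x ∈ exp <;> by_cases h2 : x = g <;>
      simp [PySem.Set.mem_add, h1, h2]
  rw [hfe]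
  apply List.length_filter_lt_length_iff_exists.2
  refine ⟨g, ?_, by simp⟩
  exact List.mem_filter.2 ⟨(PySem.List.mem_dedup _ _).2 hkey, by simpa using hnot⟩

theorem pvLoopA_isSome (G : PySem.Dict String (List String))
    (rec : String → Option (List String × PySem.Set String)) :
    ∀ entries, (∀ e ∈ entries, PySem.Dict.contains G e = true → (rec e).isSome) →
      ∀ st, (pvLoopA G rec entries st).isSome := by
  intro entries
  induction entries with
  | nil => intro _ st; simp [pvLoopA]
  | cons e rest ih =>
    intro h st
    by_cases hk : PySem.Dict.contains G e
    · rcases hrec : rec e with _ | r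
      · have := h e (by simp) hk
        simp [hrec] at this
      · obtain ⟨sp, sg⟩ := r
        simp only [pvLoopA, hk, if_true, hrec]
        exact ih (fun e' he' hk' => h e' (by simp [he']) hk') _
    · simp only [pvLoopA, hk, Bool.false_eq_true, if_false]
      exact ih (fun e' he' hk' => h e' (by simp [he']) hk') _

theorem pvTOT (G : PySem.Dict String (List String)) (exp0 : PySem.Set String) (g0 : String)
    (hA : ∀ k ∈ pvReachStar G g0, k ∉ exp0 ∧ k ∉ pvReachPlus G k) :
    ∀ fuel g exp, g ∈ pvReachStar G g0 →
      (∀ p ∈ exp, p ∈ exp0 ∨ g ∈ pvReachPlus G p) →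
      pvRem G exp < fuel →
      (pvResolveA G fuel g exp).isSome := by
  intro fuel
  induction fuel with
  | zero => intro g exp _ _ hlt; omega
  | succ f ih =>
    intro g exp hgRS hinv hlt
    have hgnot : g ∉ exp := by
      intro hg
      rcases hinv g hg with h | h
      · exact (hA g hgRS).1 h
      · exact (hA g hgRS).2 h
    have hgc : ¬ PySem.Set.contains exp g = true := by
      intro hc; exact hgnot ((PySem.Set.contains_iff _ _).1 hc)
    rw [pvResolveA_succ, if_neg hgc]
    have hrec : ∀ e ∈ PySem.Dict.getD G g [], PySem.Dict.contains G e = true →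
        (pvResolveA G f e (PySem.Set.add exp g)).isSome := by
      intro e he hke
      have hgkey : PySem.Dict.contains G g = true := by
        by_contra hk
        rw [PySem.Dict.getD_of_not_contains G [] (by simpa using hk)] at he
        simp at he
      have hsucc : e ∈ pvSuccs G g := List.mem_filter.2 ⟨he, by simpa using hke⟩
      have heRS : e ∈ pvReachStar G g0 := pv_pvReachStar_closed G g0 g e hgRS hsucc
      have hinv' : ∀ p ∈ PySem.Set.add exp g, p ∈ exp0 ∨ e ∈ pvReachPlus G p := by
        intro p hp
        rcases (PySem.Set.mem_add _ _ _).1 hp with hp | hp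
        · rcases hinv p hp with h | h
          · exact Or.inl h
          · exact Or.inr (pv_pvReachPlus_closed G p g e h hsucc)
        · subst hp
          exact Or.inr (pv_succs_mem_pvReachPlus G p e hsucc)
      have hlt' : pvRem G (PySem.Set.add exp g) < f := by
        have := pvRem_lt G exp g ((PySem.Dict.contains_iff_mem_keys _ _).1 hgkey) hgnot
        omega
      exact ih e (PySem.Set.add exp g) heRS hinv' hlt'
    have hloop := pvLoopA_isSome G (fun e => pvResolveA G f e (PySem.Set.add exp g))
      (PySem.Dict.getD G g []) hrec (PySem.Set.ofList [g], PySem.Set.empty, [])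
    rcases hl : pvLoopA G (fun e => pvResolveA G f e (PySem.Set.add exp g))
        (PySem.Dict.getD G g []) (PySem.Set.ofList [g], PySem.Set.empty, []) with _ | st
    · rw [hl] at hloop; simp at hloop
    · obtain ⟨eg, sn, fl⟩ := st
      simp

-- ---- the per-input fuel for B's port is large enough ----
theorem pvHW (gs : List (String × List String)) (gname : String) :
    (PySem.Dict.getD (PySem.Dict.mk gs) gname []).length + 2
      ≤ (gs.map (fun p => p.2.length)).sum + 2 := by
  rcases hq : PySem.Dict.get? (PySem.Dict.mk gs) gname with _ | v
  · rw [PySem.Dict.getD_of_get?_eq_none _ _ hq]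
    simp
  · rw [PySem.Dict.getD_of_get?_eq_some _ _ hq]
    have hq' : Option.map (fun x => x.2) (List.find? (fun p => p.1 == gname) gs) = some v := hq
    rcases hf : List.find? (fun p => p.1 == gname) gs with _ | p
    · rw [hf] at hq'; cases hq'
    · rw [hf] at hq'
      have hv : v = p.2 := (Option.some.inj hq').symm
      have hmem : p ∈ gs := List.mem_of_find?_eq_some hf
      have hlen : p.2.length ∈ gs.map (fun q => q.2.length) :=
        List.mem_map_of_mem hmem
      have := List.single_le_sum (l := gs.map (fun q => q.2.length)) (by simp) _ hlen
      have hv' : v.length = p.2.length := by rw [hv]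
      omega

-- ===== VERDICT (by name: the statement is the Claim_ definition above) =====
theorem resolve_group_py_spec : Claim_equal_resolve_group_py := by
  intro gn gs e _dom hpre
  show resolve_group_py gn gs e = resolve_group_py_alt gn gs e
  have hrem : pvRem (PySem.Dict.mk gs) (pvExp0 e) < gs.length + 1 := by
    have h1 : pvRem (PySem.Dict.mk gs) (pvExp0 e)
        ≤ (PySem.List.dedup (PySem.Dict.keys (PySem.Dict.mk gs))).length :=
      List.length_filter_le _ _
    have h2 : (PySem.List.dedup (PySem.Dict.keys (PySem.Dict.mk gs))).length
        ≤ (PySem.Dict.keys (PySem.Dict.mk gs)).length := by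
      rw [PySem.List.dedup_eq_ofList]
      exact PySem.Set.length_ofList_le _
    have h3 : (PySem.Dict.keys (PySem.Dict.mk gs)).length = gs.length := by
      simp [PySem.Dict.keys, PySem.Dict.size]
    omega
  have hsome := pvTOT (PySem.Dict.mk gs) (pvExp0 e) gn hpre (gs.length + 1) gn (pvExp0 e)
    (pv_mem_pvReachStar_self _ gn) (fun p hp => Or.inl hp) hrem
  rcases hr : pvResolveA (PySem.Dict.mk gs) (gs.length + 1) gn (pvExp0 e) with _ | r
  · rw [hr] at hsome; simp at hsome
  · obtain ⟨fa, ga⟩ := r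
    have hgn_mem : gn ∉ pvExp0 e := (hpre gn (pv_mem_pvReachStar_self _ gn)).1
    have hgc : PySem.Set.contains (pvExp0 e) gn = false := by
      cases hco : PySem.Set.contains (pvExp0 e) gn
      · rfl
      · exact absurd ((PySem.Set.contains_iff _ _).1 hco) hgn_mem
    obtain ⟨-, ⟨t, hga⟩, n, hn, HM⟩ :=
      pvRUN (PySem.Dict.mk gs) ((gs.map (fun p => p.2.length)).sum + 2)
        (fun gname => pvHW gs gname) gs.length gn (pvExp0 e) fa ga hr
    obtain ⟨hnd, -, s, hfa⟩ := pvGA _ _ _ _ _ _ hr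
    have hmach := HM 1 [] (PySem.Set.ofList [gn]) PySem.Set.empty []
      (by show gn ∈ ([gn] : List String); simp)
    have hga_eq : PySem.Set.union (PySem.Set.ofList [gn]) ga = ga := by
      rw [hga]
      show PySem.Set.update (PySem.Set.ofList [gn]) (gn :: t) = gn :: t
      have h0 : (PySem.Set.ofList [gn] : List String) = [gn] := rfl
      rw [h0, PySem.Set.update_cons]
      have h1 : PySem.Set.add ([gn] : List String) gn = [gn] :=
        PySem.Set.add_of_mem (by simp)
      rw [h1]
      rw [hga] at hnd
      have hnt : t.Nodup := (List.nodup_cons.1 hnd).2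
      have hgt : gn ∉ t := (List.nodup_cons.1 hnd).1
      rw [PySem.Set.update_eq_append_of_disjoint _ _ hnt
        (fun x hx hmem => hgt (by have hxg : x = gn := by simpa using hmem
                                  exact hxg ▸ hx))]
      rfl
    have hfin : pvMach (PySem.Dict.mk gs) (pvFuel gs)
        [(gn, PySem.Dict.getD (PySem.Dict.mk gs) gn [], 0)]
        (PySem.Set.add (pvExp0 e) gn) (PySem.Set.ofList [gn]) PySem.Set.empty []
        = some (fa, ga) := by
      have hle : n + 1 ≤ pvFuel gs := by unfold pvFuel; omega
      apply pvMach_mono_le _ _ (n + 1) hle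
      rw [hmach, pvMach_nil]
      rw [show (fa.foldl pvDedupStep (PySem.Set.empty, [])).2 = fa from by rw [hfa]]
      rw [hga_eq]
    unfold resolve_group_py resolve_group_py_alt
    rw [hr]
    rw [if_neg (by rw [hgc]; simp)]
    rw [hfin]
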